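-- pv_equiv track=rewrite | github.com/santipvz/linkedin-puzzle-solvers | games/patches_solver/src/patches_solver.py | _contains_foreign_clue
-- ===== SOURCE A (Python) =====
-- def _contains_foreign_clue(
--     clue_index: int,
--     top: int,
--     left: int,
--     height: int,
--     width: int,
--     clue_positions: dict[tuple[int, int], int],
-- ) -> bool:
--     for row in range(top, top + height):
--         for col in range(left, left + width):
--             occupant = clue_positions.get((row, col))
--             if occupant is not None and occupant != clue_index:
--                 return True
--     return False
-- ===== SOURCE B (Python) =====
-- def _contains_foreign_clue(
--     clue_index: int,
--     top: int,
--     left: int,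
--     height: int,
--     width: int,
--     clue_positions: dict[tuple[int, int], int],
-- ) -> bool:
--     return any(
--         occupant != clue_index
--         and top <= row < top + height
--         and left <= col < left + width
--         for (row, col), occupant in clue_positions.items()
--     )
-- ===== Notes on version B (the rewrite author's own statement) =====
-- stated objective: faster
-- what changed: Instead of scanning every cell of the height*width rectangle and doing a dict lookup per cell, B iterates once over the clue_positions entries and tests rectangle membership of each, so the rectangle is never enumerated.
import Mathlib
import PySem

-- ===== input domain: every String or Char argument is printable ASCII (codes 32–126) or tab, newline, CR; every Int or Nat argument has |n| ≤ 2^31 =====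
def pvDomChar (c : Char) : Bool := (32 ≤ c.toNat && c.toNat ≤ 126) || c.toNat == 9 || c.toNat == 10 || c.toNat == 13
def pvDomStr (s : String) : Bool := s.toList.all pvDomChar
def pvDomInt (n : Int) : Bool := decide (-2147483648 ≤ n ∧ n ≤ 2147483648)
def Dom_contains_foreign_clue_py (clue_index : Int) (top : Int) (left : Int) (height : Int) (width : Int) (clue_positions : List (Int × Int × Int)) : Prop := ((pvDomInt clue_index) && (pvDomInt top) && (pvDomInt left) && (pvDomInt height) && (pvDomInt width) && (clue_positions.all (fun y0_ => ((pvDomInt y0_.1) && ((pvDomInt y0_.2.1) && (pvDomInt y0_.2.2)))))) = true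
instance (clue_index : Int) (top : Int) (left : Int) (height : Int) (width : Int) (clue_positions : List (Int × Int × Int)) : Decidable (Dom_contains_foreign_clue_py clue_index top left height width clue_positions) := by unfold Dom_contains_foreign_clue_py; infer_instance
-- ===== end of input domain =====

-- B replaces the per-cell rectangle scan with a single pass over the clue entries (faster: O(#clues) vs O(height*width)).


-- ===== PORT A =====
-- clue_positions.get((row, col)): first entry with matching key (exact for a Python dict, whose keys are unique)
def cfc_get? : List (Int × Int × Int) → Int → Int → Option Int
  | [], _, _ => none
  | (r', c', v) :: t, r, c => if r' = r && c' = c then some v else cfc_get? t r c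

def contains_foreign_clue_py (clue_index : Int) (top : Int) (left : Int) (height : Int) (width : Int) (clue_positions : List (Int × Int × Int)) : Bool :=
  (PySem.List.pyRange top (top + height) 1).any (fun row =>
    (PySem.List.pyRange left (left + width) 1).any (fun col =>
      match cfc_get? clue_positions row col with
      | some occupant => occupant != clue_index
      | none => false))

-- ===== PORT B =====
def contains_foreign_clue_py_alt (clue_index : Int) (top : Int) (left : Int) (height : Int) (width : Int) (clue_positions : List (Int × Int × Int)) : Bool :=
  clue_positions.any (fun e =>
    e.2.2 != clue_index
    && (decide (top ≤ e.1) && decide (e.1 < top + height))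
    && (decide (left ≤ e.2.1) && decide (e.2.1 < left + width)))

-- ===== PRECONDITION & SPEC =====
-- Pre_ excludes association lists with a duplicated (row, col) key: a Python dict cannot hold
-- duplicate keys, so such lists do not arise from A's actual argument type.
def Pre_contains_foreign_clue_py (clue_index : Int) (top : Int) (left : Int) (height : Int) (width : Int) (clue_positions : List (Int × Int × Int)) : Prop :=
  (clue_positions.map (fun e => (e.1, e.2.1))).Nodup
instance (clue_index : Int) (top : Int) (left : Int) (height : Int) (width : Int) (clue_positions : List (Int × Int × Int)) : Decidable (Pre_contains_foreign_clue_py clue_index top left height width clue_positions) := by unfold Pre_contains_foreign_clue_py; infer_instance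

def pvWitness_contains_foreign_clue_py : Int × Int × Int × Int × Int × (List (Int × Int × Int)) := (3, 0, 0, 2, 2, [(0, 0, 1), (1, 1, 3)])

def Spec_contains_foreign_clue_py (clue_index : Int) (top : Int) (left : Int) (height : Int) (width : Int) (clue_positions : List (Int × Int × Int)) (out : Bool) : Prop := out = contains_foreign_clue_py_alt clue_index top left height width clue_positions
instance (clue_index : Int) (top : Int) (left : Int) (height : Int) (width : Int) (clue_positions : List (Int × Int × Int)) (out : Bool) : Decidable (Spec_contains_foreign_clue_py clue_index top left height width clue_positions out) := by unfold Spec_contains_foreign_clue_py; infer_instance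

-- ===== CLAIM (what is proved, stated in full; the proofs are below) =====
def Claim_equal_contains_foreign_clue_py : Prop := ∀ (clue_index : Int) (top : Int) (left : Int) (height : Int) (width : Int) (clue_positions : List (Int × Int × Int)), Dom_contains_foreign_clue_py clue_index top left height width clue_positions → Pre_contains_foreign_clue_py clue_index top left height width clue_positions → Spec_contains_foreign_clue_py clue_index top left height width clue_positions (contains_foreign_clue_py clue_index top left height width clue_positions)

-- ===== LEMMAS AND PROOFS =====

theorem cfc_get?_iff_mem {ps : List (Int × Int × Int)}
    (h : (ps.map (fun e => (e.1, e.2.1))).Nodup) (r c v : Int) :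
    cfc_get? ps r c = some v ↔ (r, c, v) ∈ ps := by
  induction ps with
  | nil => simp [cfc_get?]
  | cons head tail ih =>
    obtain ⟨r', c', v'⟩ := head
    simp only [List.map_cons, List.nodup_cons] at h
    by_cases hk : r' = r ∧ c' = c
    · obtain ⟨hr, hc⟩ := hk
      subst hr; subst hc
      simp only [cfc_get?, decide_true, Bool.and_self, List.mem_cons]
      constructor
      · rintro hv; left; cases hv; rfl
      · rintro (he | ht)
        · cases he; rfl
        · exfalso
          exact h.1 (by simpa using List.mem_map_of_mem (f := fun e : Int × Int × Int => (e.1, e.2.1)) ht)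
    · have hb : (decide (r' = r) && decide (c' = c)) = false := by
        rcases Decidable.not_and_iff_or_not.mp hk with h1 | h1 <;> simp [h1]
      rw [show cfc_get? ((r', c', v') :: tail) r c = cfc_get? tail r c from by
        simp [cfc_get?, hb]]
      rw [ih h.2, List.mem_cons]
      constructor
      · intro hm; right; exact hm
      · rintro (he | ht)
        · exfalso; apply hk; injection he with e1 e2; exact ⟨e1.symm, by injection e2 with a b; exact a.symm⟩
        · exact ht

theorem contains_foreign_clue_py_spec : Claim_equal_contains_foreign_clue_py := by
  intro clue_index top left height width clue_positions _ hpre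
  unfold Spec_contains_foreign_clue_py
  rw [Bool.eq_iff_iff]
  unfold contains_foreign_clue_py contains_foreign_clue_py_alt
  simp only [List.any_eq_true, PySem.List.mem_pyRange_one, Bool.and_eq_true, bne_iff_ne,
    decide_eq_true_eq]
  constructor
  · rintro ⟨row, hr, col, hc, hocc⟩
    rcases hv : cfc_get? clue_positions row col with _ | v
    · rw [hv] at hocc; simp at hocc
    · rw [hv] at hocc
      simp only [bne_iff_ne] at hocc
      have hm := (cfc_get?_iff_mem hpre row col v).mp hv
      exact ⟨(row, col, v), hm, by tauto⟩
  · rintro ⟨⟨r, c, v⟩, hm, hrest⟩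
    refine ⟨r, ?_, c, ?_, ?_⟩
    · tauto
    · tauto
    · rw [(cfc_get?_iff_mem hpre r c v).mpr hm]
      simp only [bne_iff_ne]
      tauto
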